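-- pv_equiv track=rewrite | github.com/LeandHadergjonaj/RentScope | backend/main.py | normalize_image_urls
-- ===== SOURCE A (Python) =====
-- from typing import Optional, List, Dict, Any, Tuple
--
-- def normalize_image_urls(urls: List[str]) -> List[str]:
--     """Normalize and deduplicate image URLs."""
--     normalized = []
--     seen = set()
--
--     for url in urls:
--         if not url or not url.startswith('https://'):
--             continue
--
--         # Remove query params for deduplication (keep original for fetching)
--         url_base = url.split('?')[0]
--         if url_base not in seen:
--             seen.add(url_base)
--             normalized.append(url)
--
--     # Prefer larger images if obvious from URL
--     def url_priority(url: str) -> int: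
--         priority = 0
--         url_lower = url.lower()
--         if any(keyword in url_lower for keyword in ['large', 'full', '1024', '1280', '1920']):
--             priority += 10
--         if any(keyword in url_lower for keyword in ['thumb', 'small', '64', '128']):
--             priority -= 10
--         return priority
--
--     normalized.sort(key=url_priority, reverse=True)
--     return normalized[:10]  # Max 10 for UI
-- ===== SOURCE B (Python) =====
-- def normalize_image_urls(urls):
--     """Normalize and deduplicate image URLs (single pass, bucket instead of sort)."""
--     high, mid, low = [], [], []
--     seen = set()
--     for url in urls:
--         if not url or not url.startswith('https://'):
--             continue
--         base = url.split('?')[0]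
--         if base in seen:
--             continue
--         seen.add(base)
--         ul = url.lower()
--         big = any(k in ul for k in ('large', 'full', '1024', '1280', '1920'))
--         small = any(k in ul for k in ('thumb', 'small', '64', '128'))
--         if big and not small:
--             high.append(url)
--         elif small and not big:
--             low.append(url)
--         else:
--             mid.append(url)
--     return (high + mid + low)[:10]
-- ===== Notes on version B (the rewrite author's own statement) =====
-- stated objective: alternative
-- what changed: Replaces the stable reverse sort by url_priority with a single pass that buckets each deduplicated URL into high/mid/low by its keyword class and concatenates the buckets; it trades the sort for an O(n) classification merged into the dedup loop.
import Mathlib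
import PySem

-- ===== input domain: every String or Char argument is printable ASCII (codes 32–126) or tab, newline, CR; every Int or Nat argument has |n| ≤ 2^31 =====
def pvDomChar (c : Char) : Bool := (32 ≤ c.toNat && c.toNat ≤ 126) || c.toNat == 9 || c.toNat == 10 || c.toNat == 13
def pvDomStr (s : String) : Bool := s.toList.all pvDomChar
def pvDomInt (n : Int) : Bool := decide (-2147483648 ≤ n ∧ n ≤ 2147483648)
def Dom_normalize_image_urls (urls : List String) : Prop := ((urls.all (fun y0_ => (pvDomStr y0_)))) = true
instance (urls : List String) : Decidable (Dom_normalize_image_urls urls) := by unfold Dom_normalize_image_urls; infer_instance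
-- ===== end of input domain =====

-- B replaces A's stable reverse sort by url_priority with a single pass that buckets each
-- deduplicated URL into high/mid/low and concatenates the buckets (objective: alternative).
-- A does not mutate its argument (it sorts a local list), so return-value equivalence is full equivalence.

-- ===== PORT A =====
-- url.split('?')[0]  (split? with the non-empty separator "?" always returns a non-empty list; the fallback arm is unreachable)
def pvSplitHead (url : String) : String :=
  match PySem.Str.split? url "?" with
  | some (p :: _) => p
  | _ => url

def pvBigKeys : List String := ["large", "full", "1024", "1280", "1920"]
def pvSmallKeys : List String := ["thumb", "small", "64", "128"]

def pvUrlPriority (url : String) : Int :=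
  let url_lower := PySem.Str.lower url
  let priority : Int := 0
  let priority := if pvBigKeys.any (fun k => PySem.Str.isIn k url_lower) then priority + 10 else priority
  let priority := if pvSmallKeys.any (fun k => PySem.Str.isIn k url_lower) then priority - 10 else priority
  priority

-- loop body of A's for-loop over urls (state: normalized, seen; url_base is written inline as pvSplitHead url)
def pvStepA (st : List String × PySem.Set String) (url : String) : List String × PySem.Set String :=
  if (decide (url = "") || !PySem.Str.startswith url "https://") = true then st
  else if PySem.Set.contains st.2 (pvSplitHead url) = true then st
  else (st.1 ++ [url], PySem.Set.add st.2 (pvSplitHead url))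

def normalize_image_urls (urls : List String) : List String :=
  PySem.List.slice
    (PySem.List.sorted (urls.foldl pvStepA ([], PySem.Set.empty)).1 pvUrlPriority true)
    none (some 10)

-- ===== PORT B =====
-- loop body of B's single pass (state: seen, high, mid, low; base/ul/big/small written inline)
def pvStepB (st : PySem.Set String × List String × List String × List String) (url : String) :
    PySem.Set String × List String × List String × List String :=
  if (decide (url = "") || !PySem.Str.startswith url "https://") = true then st
  else if PySem.Set.contains st.1 (pvSplitHead url) = true then st
  else if (pvBigKeys.any (fun k => PySem.Str.isIn k (PySem.Str.lower url)) &&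
           !pvSmallKeys.any (fun k => PySem.Str.isIn k (PySem.Str.lower url))) = true then
    (PySem.Set.add st.1 (pvSplitHead url), st.2.1 ++ [url], st.2.2.1, st.2.2.2)
  else if (pvSmallKeys.any (fun k => PySem.Str.isIn k (PySem.Str.lower url)) &&
           !pvBigKeys.any (fun k => PySem.Str.isIn k (PySem.Str.lower url))) = true then
    (PySem.Set.add st.1 (pvSplitHead url), st.2.1, st.2.2.1, st.2.2.2 ++ [url])
  else
    (PySem.Set.add st.1 (pvSplitHead url), st.2.1, st.2.2.1 ++ [url], st.2.2.2)

def normalize_image_urls_alt (urls : List String) : List String :=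
  PySem.List.slice
    (((urls.foldl pvStepB (PySem.Set.empty, [], [], [])).2.1 ++
      (urls.foldl pvStepB (PySem.Set.empty, [], [], [])).2.2.1) ++
      (urls.foldl pvStepB (PySem.Set.empty, [], [], [])).2.2.2)
    none (some 10)

-- ===== PRECONDITION & SPEC =====
def Spec_normalize_image_urls (urls : List String) (out : List String) : Prop := out = normalize_image_urls_alt urls
instance (urls : List String) (out : List String) : Decidable (Spec_normalize_image_urls urls out) := by unfold Spec_normalize_image_urls; infer_instance

-- ===== CLAIM (what is proved, stated in full; the proofs are below) =====
def Claim_equal_normalize_image_urls : Prop := ∀ (urls : List String), Dom_normalize_image_urls urls → Spec_normalize_image_urls urls (normalize_image_urls urls)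

-- ===== LEMMAS AND PROOFS =====

-- bucket predicates (Bool-valued, for List.filter)
def pvHi (x : String) : Bool := decide (pvUrlPriority x = 10)
def pvMd (x : String) : Bool := decide (pvUrlPriority x = 0)
def pvLo (x : String) : Bool := decide (pvUrlPriority x = -10)

lemma pvKey_eq (url : String) :
    pvUrlPriority url =
      (if (pvBigKeys.any (fun k => PySem.Str.isIn k (PySem.Str.lower url))) = true then (10 : Int) else 0) +
      (if (pvSmallKeys.any (fun k => PySem.Str.isIn k (PySem.Str.lower url))) = true then (-10 : Int) else 0) := by
  simp only [pvUrlPriority]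
  split_ifs <;> simp

lemma pvKey_cases (url : String) :
    pvUrlPriority url = 10 ∨ pvUrlPriority url = 0 ∨ pvUrlPriority url = -10 := by
  rw [pvKey_eq]; split_ifs <;> omega

lemma ins_front (x : String) (ys : List String)
    (h : ∀ y ∈ ys, pvUrlPriority y < pvUrlPriority x) :
    PySem.List.insertBy (fun a b => decide (pvUrlPriority b < pvUrlPriority a)) x ys = x :: ys := by
  cases ys with
  | nil => rfl
  | cons y ys => simp [PySem.List.insertBy, h y (by simp)]

lemma ins_last (x : String) (ys : List String)
    (h : ∀ y ∈ ys, ¬ pvUrlPriority y < pvUrlPriority x) :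
    PySem.List.insertBy (fun a b => decide (pvUrlPriority b < pvUrlPriority a)) x ys = ys ++ [x] := by
  induction ys with
  | nil => rfl
  | cons y ys ih =>
    have h1 : ¬ pvUrlPriority y < pvUrlPriority x := h y (by simp)
    simp only [PySem.List.insertBy]
    rw [if_neg (by simpa using h1)]
    simp [ih (fun z hz => h z (by simp [hz]))]

lemma ins_append (x : String) (pre rest : List String)
    (h : ∀ y ∈ pre, ¬ pvUrlPriority y < pvUrlPriority x) :
    PySem.List.insertBy (fun a b => decide (pvUrlPriority b < pvUrlPriority a)) x (pre ++ rest) =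
      pre ++ PySem.List.insertBy (fun a b => decide (pvUrlPriority b < pvUrlPriority a)) x rest := by
  induction pre with
  | nil => rfl
  | cons y ys ih =>
    simp only [List.cons_append, PySem.List.insertBy]
    rw [if_neg (by simpa using h y (by simp)), ih (fun z hz => h z (by simp [hz]))]

lemma ins_buckets (x : String) (h m l : List String)
    (hh : ∀ y ∈ h, pvUrlPriority y = 10) (hm : ∀ y ∈ m, pvUrlPriority y = 0)
    (hl : ∀ y ∈ l, pvUrlPriority y = -10) :
    PySem.List.insertBy (fun a b => decide (pvUrlPriority b < pvUrlPriority a)) x (h ++ (m ++ l)) =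
      if pvUrlPriority x = 10 then (h ++ [x]) ++ (m ++ l)
      else if pvUrlPriority x = 0 then h ++ ((m ++ [x]) ++ l)
      else h ++ (m ++ (l ++ [x])) := by
  rcases pvKey_cases x with hx | hx | hx
  · have h1 : ∀ y ∈ h, ¬ pvUrlPriority y < pvUrlPriority x := by
      intro y hy; rw [hh y hy, hx]; omega
    have h2 : ∀ y ∈ m ++ l, pvUrlPriority y < pvUrlPriority x := by
      intro y hy
      rcases List.mem_append.1 hy with hy | hy
      · rw [hm y hy, hx]; omega
      · rw [hl y hy, hx]; omega
    rw [if_pos hx, ins_append x h (m ++ l) h1, ins_front x (m ++ l) h2]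
    simp
  · have h1 : ∀ y ∈ h, ¬ pvUrlPriority y < pvUrlPriority x := by
      intro y hy; rw [hh y hy, hx]; omega
    have h2 : ∀ y ∈ m, ¬ pvUrlPriority y < pvUrlPriority x := by
      intro y hy; rw [hm y hy, hx]; omega
    have h3 : ∀ y ∈ l, pvUrlPriority y < pvUrlPriority x := by
      intro y hy; rw [hl y hy, hx]; omega
    rw [if_neg (by omega), if_pos hx, ins_append x h (m ++ l) h1, ins_append x m l h2,
      ins_front x l h3]
    simp
  · have h1 : ∀ y ∈ h, ¬ pvUrlPriority y < pvUrlPriority x := by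
      intro y hy; rw [hh y hy, hx]; omega
    have h2 : ∀ y ∈ m, ¬ pvUrlPriority y < pvUrlPriority x := by
      intro y hy; rw [hm y hy, hx]; omega
    have h3 : ∀ y ∈ l, ¬ pvUrlPriority y < pvUrlPriority x := by
      intro y hy; rw [hl y hy, hx]; omega
    rw [if_neg (by omega), if_neg (by omega), ins_append x h (m ++ l) h1, ins_append x m l h2,
      ins_last x l h3]

lemma fold_ins (xs : List String) (h m l : List String)
    (hh : ∀ y ∈ h, pvUrlPriority y = 10) (hm : ∀ y ∈ m, pvUrlPriority y = 0)
    (hl : ∀ y ∈ l, pvUrlPriority y = -10) :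
    xs.foldl (fun acc x => PySem.List.insertBy (fun a b => decide (pvUrlPriority b < pvUrlPriority a)) x acc) (h ++ (m ++ l)) =
      (h ++ xs.filter pvHi) ++ ((m ++ xs.filter pvMd) ++ (l ++ xs.filter pvLo)) := by
  induction xs generalizing h m l with
  | nil => simp
  | cons x xs ih =>
    simp only [List.foldl_cons]
    rw [ins_buckets x h m l hh hm hl]
    rcases pvKey_cases x with hx | hx | hx
    · have hh' : ∀ y ∈ h ++ [x], pvUrlPriority y = 10 := by
        intro y hy
        rcases List.mem_append.1 hy with hy | hy
        · exact hh y hy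
        · simp at hy; subst hy; exact hx
      rw [if_pos hx, ih (h ++ [x]) m l hh' hm hl]
      simp [pvHi, pvMd, pvLo, hx]
    · have hm' : ∀ y ∈ m ++ [x], pvUrlPriority y = 0 := by
        intro y hy
        rcases List.mem_append.1 hy with hy | hy
        · exact hm y hy
        · simp at hy; subst hy; exact hx
      rw [if_neg (by omega), if_pos hx, ih h (m ++ [x]) l hh hm' hl]
      simp [pvHi, pvMd, pvLo, hx]
    · have hl' : ∀ y ∈ l ++ [x], pvUrlPriority y = -10 := by
        intro y hy
        rcases List.mem_append.1 hy with hy | hy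
        · exact hl y hy
        · simp at hy; subst hy; exact hx
      rw [if_neg (by omega), if_neg (by omega), ih h m (l ++ [x]) hh hm hl']
      simp [pvHi, pvMd, pvLo, hx]

lemma sorted_buckets (xs : List String) :
    PySem.List.sorted xs pvUrlPriority true =
      (xs.filter pvHi ++ xs.filter pvMd) ++ xs.filter pvLo := by
  rw [PySem.List.sorted_rev_eq_foldl_insertBy]
  have := fold_ins xs [] [] [] (by simp) (by simp) (by simp)
  simpa [List.append_assoc] using this

-- the single-pass step keeps: same seen set, buckets = filters of A's normalized list
lemma step_corr (url : String) (norm : List String) (seen : PySem.Set String) :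
    pvStepB (seen, norm.filter pvHi, norm.filter pvMd, norm.filter pvLo) url =
      ((pvStepA (norm, seen) url).2,
       (pvStepA (norm, seen) url).1.filter pvHi,
       (pvStepA (norm, seen) url).1.filter pvMd,
       (pvStepA (norm, seen) url).1.filter pvLo) := by
  unfold pvStepA pvStepB
  by_cases hg : (decide (url = "") || !PySem.Str.startswith url "https://") = true
  · rw [if_pos hg, if_pos hg]
  · rw [if_neg hg, if_neg hg]
    by_cases hs : PySem.Set.contains seen (pvSplitHead url) = true
    · rw [if_pos hs, if_pos hs]
    · rw [if_neg hs, if_neg hs]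
      cases hb : (pvBigKeys.any (fun k => PySem.Str.isIn k (PySem.Str.lower url))) <;>
        cases hsm : (pvSmallKeys.any (fun k => PySem.Str.isIn k (PySem.Str.lower url)))
      · have hkey : pvUrlPriority url = 0 := by
          rw [pvKey_eq, if_neg (by rw [hb]; decide), if_neg (by rw [hsm]; decide)]; decide
        rw [if_neg (by simp_all), if_neg (by simp_all)]
        simp [List.filter_append, pvHi, pvMd, pvLo, hkey]
      · have hkey : pvUrlPriority url = -10 := by
          rw [pvKey_eq, if_neg (by rw [hb]; decide), if_pos hsm]; decide
        rw [if_neg (by simp_all), if_pos (by simp_all)]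
        simp [List.filter_append, pvHi, pvMd, pvLo, hkey]
      · have hkey : pvUrlPriority url = 10 := by
          rw [pvKey_eq, if_pos hb, if_neg (by rw [hsm]; decide)]; decide
        rw [if_pos (by simp_all)]
        simp [List.filter_append, pvHi, pvMd, pvLo, hkey]
      · have hkey : pvUrlPriority url = 0 := by
          rw [pvKey_eq, if_pos hb, if_pos hsm]; decide
        rw [if_neg (by simp_all), if_neg (by simp_all)]
        simp [List.filter_append, pvHi, pvMd, pvLo, hkey]

lemma fold_corr (urls : List String) (norm : List String) (seen : PySem.Set String) :
    urls.foldl pvStepB (seen, norm.filter pvHi, norm.filter pvMd, norm.filter pvLo) =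
      ((urls.foldl pvStepA (norm, seen)).2,
       (urls.foldl pvStepA (norm, seen)).1.filter pvHi,
       (urls.foldl pvStepA (norm, seen)).1.filter pvMd,
       (urls.foldl pvStepA (norm, seen)).1.filter pvLo) := by
  induction urls generalizing norm seen with
  | nil => rfl
  | cons url urls ih =>
    simp only [List.foldl_cons]
    rw [step_corr url norm seen]
    have h2 : pvStepA (norm, seen) url = ((pvStepA (norm, seen) url).1, (pvStepA (norm, seen) url).2) := rfl
    rw [h2]
    exact ih (pvStepA (norm, seen) url).1 (pvStepA (norm, seen) url).2

-- ===== VERDICT (by name: the statement is the Claim_ definition above) =====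
theorem normalize_image_urls_spec : Claim_equal_normalize_image_urls := by
  intro urls _
  show normalize_image_urls urls = normalize_image_urls_alt urls
  simp only [normalize_image_urls, normalize_image_urls_alt]
  have h := fold_corr urls [] PySem.Set.empty
  simp only [List.filter_nil] at h
  rw [h, sorted_buckets]
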